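-- pv_equiv track=rewrite | github.com/mcd005/algoPrac | Strings/LongestPassword.py | solution
-- ===== SOURCE A (Python) =====
-- def solution(S):
--     N = len(S)
--
--     legalChars = True
--     numLetters = 0
--     numDigits = 0
--     maxValid = -1
--
--     for i in range(N):
--         if S[i].isalpha():
--             numLetters += 1
--         elif S[i].isdigit():
--             numDigits += 1
--         elif S[i].isspace():
--             if legalChars and (numLetters % 2 == 0) and (numDigits % 2 == 1):
--                 maxValid = max(maxValid, numLetters + numDigits)
--             legalChars = True
--             numLetters = 0
--             numDigits = 0
--         else:
--             legalChars = False
--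
--     if legalChars and (numLetters % 2 == 0) and (numDigits % 2 == 1):
--                 maxValid = max(maxValid, numLetters + numDigits)
--
--     return maxValid
-- ===== SOURCE B (Python) =====
-- def solution(S):
--     maxValid = -1
--     for token in S.split():
--         letters = sum(1 for c in token if c.isalpha())
--         digits = sum(1 for c in token if c.isdigit())
--         legal = all(c.isalpha() or c.isdigit() for c in token)
--         if legal and letters % 2 == 0 and digits % 2 == 1:
--             maxValid = max(maxValid, len(token))
--     return maxValid
-- ===== Notes on version B (the rewrite author's own statement) =====
-- stated objective: simpler
-- what changed: Replaces the single-pass character state machine (legal flag, running letter/digit counters reset on whitespace) with tokenization via S.split() followed by per-token counting of letters/digits and a legality check, updating the max with len(token).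
import Mathlib
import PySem

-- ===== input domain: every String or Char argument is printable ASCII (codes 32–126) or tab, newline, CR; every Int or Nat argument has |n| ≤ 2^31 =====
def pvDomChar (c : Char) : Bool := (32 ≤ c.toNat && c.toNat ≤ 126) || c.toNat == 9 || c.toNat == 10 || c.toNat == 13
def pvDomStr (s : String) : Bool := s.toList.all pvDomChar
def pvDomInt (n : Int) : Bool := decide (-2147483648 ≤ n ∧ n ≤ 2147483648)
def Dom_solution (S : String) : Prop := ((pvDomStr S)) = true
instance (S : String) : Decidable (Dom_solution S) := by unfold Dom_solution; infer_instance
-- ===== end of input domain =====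

-- B replaces A's streaming character state machine by split-into-tokens plus per-token counts; objective: simpler.

-- ===== PORT A =====
-- A's loop body; state: (legalChars, numLetters, numDigits, maxValid)
def stepA (st : Bool × Int × Int × Int) (c : Char) : Bool × Int × Int × Int :=
  match st with
  | (legal, l, d, m) =>
    if PySem.Chars.isalpha c then (legal, l + 1, d, m)
    else if PySem.Chars.isdigit c then (legal, l, d + 1, m)
    else if PySem.Chars.isspace c then
      (true, 0, 0,
        if legal && (PySem.Int.mod l 2 == 0) && (PySem.Int.mod d 2 == 1) then max m (l + d) else m)
    else (false, l, d, m)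

-- A's final flush after the loop
def finishA (st : Bool × Int × Int × Int) : Int :=
  match st with
  | (legal, l, d, m) =>
    if legal && (PySem.Int.mod l 2 == 0) && (PySem.Int.mod d 2 == 1) then max m (l + d) else m

def solution (S : String) : Int :=
  finishA (S.toList.foldl stepA (true, 0, 0, -1))

-- ===== PORT B =====
def tokLetters (t : List Char) : Int := (t.countP (fun c => PySem.Chars.isalpha c) : Nat)
def tokDigits (t : List Char) : Int := (t.countP (fun c => PySem.Chars.isdigit c) : Nat)
def tokLegal (t : List Char) : Bool := t.all (fun c => PySem.Chars.isalpha c || PySem.Chars.isdigit c)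

-- B's loop body over one token of S.split()
def stepB (m : Int) (t : List Char) : Int :=
  if tokLegal t && (PySem.Int.mod (tokLetters t) 2 == 0) && (PySem.Int.mod (tokDigits t) 2 == 1)
  then max m (t.length : Int) else m

def solution_alt (S : String) : Int :=
  (PySem.Chars.split₀ S.toList).foldl stepB (-1)

-- ===== PRECONDITION & SPEC =====
def Spec_solution (S : String) (out : Int) : Prop := out = solution_alt S
instance (S : String) (out : Int) : Decidable (Spec_solution S out) := by unfold Spec_solution; infer_instance

-- ===== CLAIM (what is proved, stated in full; the proofs are below) =====
def Claim_equal_solution : Prop := ∀ (S : String), Dom_solution S → Spec_solution S (solution S)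

-- ===== LEMMAS AND PROOFS =====

theorem isdigit_not_isalpha (c : Char) (h : PySem.Chars.isdigit c = true) :
    PySem.Chars.isalpha c = false := by
  simp [PySem.Chars.isdigit, PySem.Chars.isalpha, PySem.Chars.isupper, PySem.Chars.islower,
    Char.le_def, UInt32.le_iff_toNat_le] at h ⊢
  omega

theorem isalpha_not_isspace (c : Char) (h : PySem.Chars.isalpha c = true) :
    PySem.Chars.isspace c = false := by
  simp [PySem.Chars.isalpha, PySem.Chars.isupper, PySem.Chars.islower,
    Char.le_def, UInt32.le_iff_toNat_le] at h
  cases hsp : PySem.Chars.isspace c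
  · rfl
  · exfalso
    simp only [PySem.Chars.isspace, Bool.or_eq_true, Bool.and_eq_true, decide_eq_true_eq] at hsp
    have e : Char.toNat c = c.val.toNat := rfl
    rw [e] at hsp
    omega

theorem isdigit_not_isspace (c : Char) (h : PySem.Chars.isdigit c = true) :
    PySem.Chars.isspace c = false := by
  simp [PySem.Chars.isdigit, Char.le_def, UInt32.le_iff_toNat_le] at h
  cases hsp : PySem.Chars.isspace c
  · rfl
  · exfalso
    simp only [PySem.Chars.isspace, Bool.or_eq_true, Bool.and_eq_true, decide_eq_true_eq] at hsp
    have e : Char.toNat c = c.val.toNat := rfl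
    rw [e] at hsp
    omega

theorem isalpha_isdigit_false (c : Char) (ha : PySem.Chars.isalpha c = true) :
    PySem.Chars.isdigit c = false := by
  cases hD : PySem.Chars.isdigit c
  · rfl
  · exact absurd ha (by simp [isdigit_not_isalpha c hD])


theorem stepA_eq (legal : Bool) (l d m : Int) (c : Char) :
    stepA (legal, l, d, m) c =
      (if PySem.Chars.isalpha c then (legal, l + 1, d, m)
       else if PySem.Chars.isdigit c then (legal, l, d + 1, m)
       else if PySem.Chars.isspace c then
         (true, 0, 0,
           if legal && (PySem.Int.mod l 2 == 0) && (PySem.Int.mod d 2 == 1) then max m (l + d) else m)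
       else (false, l, d, m)) := rfl

theorem finishA_eq (legal : Bool) (l d m : Int) :
    finishA (legal, l, d, m)
      = if legal && (PySem.Int.mod l 2 == 0) && (PySem.Int.mod d 2 == 1) then max m (l + d) else m := rfl

theorem tok_nil : tokLegal [] = true ∧ tokLetters [] = 0 ∧ tokDigits [] = 0 := by
  refine ⟨rfl, ?_, ?_⟩ <;> simp [tokLetters, tokDigits]

-- for a fully legal buffer, letters + digits = length
theorem legal_counts (r : List Char) (h : tokLegal r = true) :
    r.countP (fun c => PySem.Chars.isalpha c) + r.countP (fun c => PySem.Chars.isdigit c)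
      = r.length := by
  induction r with
  | nil => simp
  | cons c t ih =>
    simp [tokLegal] at h ih
    rcases h with ⟨hc, ht⟩
    have ih' := ih ht
    by_cases hA : PySem.Chars.isalpha c = true
    · have hD := isalpha_isdigit_false c hA
      simp [hA, hD]
      omega
    · have hD : PySem.Chars.isdigit c = true := by
        rcases hc with h1 | h1
        · exact absurd h1 hA
        · exact h1
      have hA' : PySem.Chars.isalpha c = false := isdigit_not_isalpha c hD
      simp [hA', hD]
      omega

-- buffer-extension equalities for the three non-space branches
theorem tok_cons_alpha (c : Char) (r : List Char) (ha : PySem.Chars.isalpha c = true) :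
    tokLegal (c :: r) = tokLegal r ∧ tokLetters (c :: r) = tokLetters r + 1
      ∧ tokDigits (c :: r) = tokDigits r := by
  have hD := isalpha_isdigit_false c ha
  refine ⟨by simp [tokLegal, ha], ?_, by simp [tokDigits, hD]⟩
  simp [tokLetters, ha]

theorem tok_cons_digit (c : Char) (r : List Char) (hd : PySem.Chars.isdigit c = true) :
    tokLegal (c :: r) = tokLegal r ∧ tokLetters (c :: r) = tokLetters r
      ∧ tokDigits (c :: r) = tokDigits r + 1 := by
  have hA := isdigit_not_isalpha c hd
  refine ⟨by simp [tokLegal, hd], by simp [tokLetters, hA], ?_⟩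
  simp [tokDigits, hd]

theorem tok_cons_bad (c : Char) (r : List Char) (ha : PySem.Chars.isalpha c = false)
    (hd : PySem.Chars.isdigit c = false) :
    tokLegal (c :: r) = false ∧ tokLetters (c :: r) = tokLetters r
      ∧ tokDigits (c :: r) = tokDigits r := by
  exact ⟨by simp [tokLegal, ha, hd], by simp [tokLetters, ha],
    by simp [tokDigits, hd]⟩

-- the empty buffer flushes to nothing (0 digits is even, not odd)
theorem finish_nil (m : Int) : finishA (tokLegal [], tokLetters [], tokDigits [], m) = m := by
  norm_num [finishA, tokLegal, tokLetters, tokDigits, PySem.Int.mod]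

-- flushing A's state for a nonempty buffer equals B's per-token step on the token
theorem flush_eq (r : List Char) (m : Int) :
    finishA (tokLegal r, tokLetters r, tokDigits r, m) = stepB m r.reverse := by
  rw [finishA_eq]
  unfold stepB
  have hL : tokLegal r.reverse = tokLegal r := by simp [tokLegal, List.all_eq]
  have hl : tokLetters r.reverse = tokLetters r := by simp [tokLetters]
  have hd : tokDigits r.reverse = tokDigits r := by simp [tokDigits]
  rw [hL, hl, hd]
  by_cases hleg : tokLegal r = true
  · have hc := legal_counts r hleg
    have hlen : tokLetters r + tokDigits r = (r.reverse.length : Int) := by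
      simp only [tokLetters, tokDigits, List.length_reverse]
      omega
    rw [hlen]
  · simp [Bool.eq_false_iff.mpr hleg]

-- split₀.go with a nonempty accumulator just prepends the reversed accumulator
theorem go_acc (cs : List Char) : ∀ (r : List Char) (acc : List (List Char)),
    PySem.Chars.split₀.go cs r acc = acc.reverse ++ PySem.Chars.split₀.go cs r [] := by
  induction cs with
  | nil =>
    intro r acc
    by_cases h : r.isEmpty <;> simp [PySem.Chars.split₀.go, h]
  | cons c t ih =>
    intro r acc
    by_cases hs : PySem.Chars.isspace c
    · by_cases h : r.isEmpty
      · rw [PySem.Chars.split₀.go, if_pos hs, if_pos h,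
            PySem.Chars.split₀.go, if_pos hs, if_pos h]
        exact ih [] acc
      · rw [PySem.Chars.split₀.go, if_pos hs, if_neg h,
            PySem.Chars.split₀.go, if_pos hs, if_neg h, ih, ih [] [r.reverse]]
        simp
    · rw [PySem.Chars.split₀.go, if_neg hs, PySem.Chars.split₀.go, if_neg hs, ih]

-- main invariant: running A's loop from the state describing the (reversed) current
-- token buffer r and flushing at the end equals B's fold over the remaining tokens
theorem main_inv (cs : List Char) : ∀ (r : List Char) (m : Int),
    finishA (cs.foldl stepA (tokLegal r, tokLetters r, tokDigits r, m))
      = (PySem.Chars.split₀.go cs r []).foldl stepB m := by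
  induction cs with
  | nil =>
    intro r m
    by_cases h : r.isEmpty
    · have hr : r = [] := by simpa [List.isEmpty_iff] using h
      subst hr
      simp only [List.foldl_nil, PySem.Chars.split₀.go, List.isEmpty_nil,
        List.reverse_nil]
      exact finish_nil m
    · rw [List.foldl_nil, PySem.Chars.split₀.go, if_neg h]
      simpa using flush_eq r m
  | cons c t ih =>
    intro r m
    by_cases ha : PySem.Chars.isalpha c = true
    · obtain ⟨h1, h2, h3⟩ := tok_cons_alpha c r ha
      have hstate : stepA (tokLegal r, tokLetters r, tokDigits r, m) c
          = (tokLegal (c :: r), tokLetters (c :: r), tokDigits (c :: r), m) := by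
        rw [h1, h2, h3, stepA_eq, if_pos ha]
      rw [List.foldl_cons, hstate, ih (c :: r) m,
        PySem.Chars.split₀.go, if_neg (by simp [isalpha_not_isspace c ha])]
    · by_cases hd : PySem.Chars.isdigit c = true
      · obtain ⟨h1, h2, h3⟩ := tok_cons_digit c r hd
        have hstate : stepA (tokLegal r, tokLetters r, tokDigits r, m) c
            = (tokLegal (c :: r), tokLetters (c :: r), tokDigits (c :: r), m) := by
          rw [h1, h2, h3, stepA_eq, if_neg ha, if_pos hd]
        rw [List.foldl_cons, hstate, ih (c :: r) m,
          PySem.Chars.split₀.go, if_neg (by simp [isdigit_not_isspace c hd])]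
      · by_cases hs : PySem.Chars.isspace c = true
        · have hstate : stepA (tokLegal r, tokLetters r, tokDigits r, m) c
              = (tokLegal [], tokLetters [], tokDigits [],
                  finishA (tokLegal r, tokLetters r, tokDigits r, m)) := by
            obtain ⟨e0, e1, e2⟩ := tok_nil
            rw [stepA_eq, if_neg ha, if_neg hd, if_pos hs, finishA_eq, e0, e1, e2]
          by_cases h : r.isEmpty
          · have hr : r = [] := by simpa [List.isEmpty_iff] using h
            subst hr
            rw [List.foldl_cons, hstate, finish_nil, ih [] m]
            simp [PySem.Chars.split₀.go, hs]
          · rw [List.foldl_cons, hstate, flush_eq r m, ih [] _,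
              PySem.Chars.split₀.go, if_pos hs, if_neg h, go_acc t [] [r.reverse]]
            simp
        · have ha' : PySem.Chars.isalpha c = false := by simpa using ha
          have hd' : PySem.Chars.isdigit c = false := by simpa using hd
          obtain ⟨h1, h2, h3⟩ := tok_cons_bad c r ha' hd'
          have hstate : stepA (tokLegal r, tokLetters r, tokDigits r, m) c
              = (tokLegal (c :: r), tokLetters (c :: r), tokDigits (c :: r), m) := by
            rw [h1, h2, h3, stepA_eq, if_neg ha, if_neg hd, if_neg hs]
          rw [List.foldl_cons, hstate, ih (c :: r) m,
            PySem.Chars.split₀.go, if_neg (by simp [hs])]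

-- ===== VERDICT (by name: the statement is the Claim_ definition above) =====
theorem solution_spec : Claim_equal_solution := by
  intro S _
  unfold Spec_solution solution solution_alt PySem.Chars.split₀
  have h := main_inv S.toList [] (-1)
  simpa [tokLegal, tokLetters, tokDigits] using h
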